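-- pv_equiv track=rewrite | github.com/HezyCB/NeonAI | Neon.py | filter_ques_ans
-- ===== SOURCE A (Python) =====
-- minimum_length = 2
--
-- maximum_length = 20
--
-- def filter_ques_ans(clean_questions,clean_answers):
--     short_questions_temp = []
--     short_answers_temp = []
--     for i, question in enumerate(clean_questions):
--         if len(question.split()) >= minimum_length and len(question.split()) <= maximum_length:
--             short_questions_temp.append(question)
--             short_answers_temp.append(clean_answers[i])
--     short_questions = []
--     short_answers = []
--     for i, answer in enumerate(short_answers_temp):
--         if len(answer.split()) >= minimum_length and len(answer.split()) <= maximum_length: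
--             short_answers.append(answer)
--             short_questions.append(short_questions_temp[i])
--     return short_questions,short_answers
-- ===== SOURCE B (Python) =====
-- minimum_length = 2
--
-- maximum_length = 20
--
-- def filter_ques_ans(clean_questions, clean_answers):
--     short_questions = []
--     short_answers = []
--     for i, question in enumerate(clean_questions):
--         if minimum_length <= len(question.split()) <= maximum_length:
--             answer = clean_answers[i]
--             if minimum_length <= len(answer.split()) <= maximum_length:
--                 short_questions.append(question)
--                 short_answers.append(answer)
--     return short_questions, short_answers
-- ===== Notes on version B (the rewrite author's own statement) =====
-- stated objective: simpler
-- what changed: Replaces A's two sequential filter passes (build temp lists keyed by question length, then re-filter them by answer length) with one combined pass that checks the question's and then the answer's word count and appends to the final lists directly.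
import Mathlib
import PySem

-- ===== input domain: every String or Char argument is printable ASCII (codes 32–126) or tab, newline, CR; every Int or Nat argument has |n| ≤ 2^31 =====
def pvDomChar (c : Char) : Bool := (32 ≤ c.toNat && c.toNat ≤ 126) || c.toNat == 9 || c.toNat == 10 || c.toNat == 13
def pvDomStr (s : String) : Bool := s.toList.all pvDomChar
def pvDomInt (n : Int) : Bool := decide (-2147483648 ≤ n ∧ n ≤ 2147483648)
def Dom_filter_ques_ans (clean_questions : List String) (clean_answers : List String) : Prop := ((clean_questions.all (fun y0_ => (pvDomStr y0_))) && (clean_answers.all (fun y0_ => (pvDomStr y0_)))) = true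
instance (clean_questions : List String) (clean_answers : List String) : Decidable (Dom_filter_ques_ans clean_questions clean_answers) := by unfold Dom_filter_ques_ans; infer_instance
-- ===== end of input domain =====

-- B is a one-pass rewrite of A's two filter passes; equal return values proved on Pre_ (where Python A returns, i.e. no IndexError).

-- word count of s = len(s.split())
def pvWC (s : String) : Nat := (PySem.Str.split₀ s).length

-- ===== PORT A =====
-- first loop: for i, question in enumerate(clean_questions): filter by question word count, pair with clean_answers[i]
def pvLoopA1 (ans : List String) : Nat → List String → (List String × List String) → (List String × List String)
  | _, [], acc => acc
  | i, q :: rest, (tq, ta) =>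
    if 2 ≤ pvWC q ∧ pvWC q ≤ 20 then
      pvLoopA1 ans (i + 1) rest (tq ++ [q], ta ++ [(PySem.List.pyGet? ans (i : Int)).getD ""])
    else pvLoopA1 ans (i + 1) rest (tq, ta)

-- second loop: for i, answer in enumerate(short_answers_temp): filter by answer word count, pair with short_questions_temp[i]
def pvLoopA2 (tq : List String) : Nat → List String → (List String × List String) → (List String × List String)
  | _, [], acc => acc
  | i, a :: rest, (sq, sa) =>
    if 2 ≤ pvWC a ∧ pvWC a ≤ 20 then
      pvLoopA2 tq (i + 1) rest (sq ++ [(PySem.List.pyGet? tq (i : Int)).getD ""], sa ++ [a])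
    else pvLoopA2 tq (i + 1) rest (sq, sa)

def filter_ques_ans (clean_questions : List String) (clean_answers : List String) : List String × List String :=
  let temp := pvLoopA1 clean_answers 0 clean_questions ([], [])
  pvLoopA2 temp.1 0 temp.2 ([], [])

-- ===== PORT B =====
-- single loop: for i, question in enumerate(clean_questions): check question, then clean_answers[i], append both
def pvLoopB (ans : List String) : Nat → List String → (List String × List String) → (List String × List String)
  | _, [], acc => acc
  | i, q :: rest, (sq, sa) =>
    if 2 ≤ pvWC q ∧ pvWC q ≤ 20 then
      let a := (PySem.List.pyGet? ans (i : Int)).getD ""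
      if 2 ≤ pvWC a ∧ pvWC a ≤ 20 then
        pvLoopB ans (i + 1) rest (sq ++ [q], sa ++ [a])
      else pvLoopB ans (i + 1) rest (sq, sa)
    else pvLoopB ans (i + 1) rest (sq, sa)

def filter_ques_ans_alt (clean_questions : List String) (clean_answers : List String) : List String × List String :=
  pvLoopB clean_answers 0 clean_questions ([], [])

-- ===== PRECONDITION & SPEC =====
-- Pre_ excludes exactly the inputs where Python A raises IndexError: an in-word-count-range
-- question at an index with no corresponding answer.
def Pre_filter_ques_ans (clean_questions : List String) (clean_answers : List String) : Prop :=
  ∀ i : Nat, (h : i < clean_questions.length) →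
    (2 ≤ pvWC clean_questions[i] ∧ pvWC clean_questions[i] ≤ 20) → i < clean_answers.length
instance (clean_questions : List String) (clean_answers : List String) : Decidable (Pre_filter_ques_ans clean_questions clean_answers) := by unfold Pre_filter_ques_ans; infer_instance
def pvWitness_filter_ques_ans : List String × List String := (["hello there", "hi"], ["general kenobi", "yo"])
def Spec_filter_ques_ans (clean_questions : List String) (clean_answers : List String) (out : List String × List String) : Prop := out = filter_ques_ans_alt clean_questions clean_answers
instance (clean_questions : List String) (clean_answers : List String) (out : List String × List String) : Decidable (Spec_filter_ques_ans clean_questions clean_answers out) := by unfold Spec_filter_ques_ans; infer_instance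

-- ===== CLAIM (what is proved, stated in full; the proofs are below) =====
def Claim_equal_filter_ques_ans : Prop := ∀ (clean_questions : List String) (clean_answers : List String), Dom_filter_ques_ans clean_questions clean_answers → Pre_filter_ques_ans clean_questions clean_answers → Spec_filter_ques_ans clean_questions clean_answers (filter_ques_ans clean_questions clean_answers)

-- ===== LEMMAS AND PROOFS =====

-- the pairs (question, answers[i] or "") selected by the question-side filter, starting at index i
def pvSel (ans : List String) : Nat → List String → List (String × String)
  | _, [] => []
  | i, q :: rest =>
    if 2 ≤ pvWC q ∧ pvWC q ≤ 20 then (q, (PySem.List.pyGet? ans (i : Int)).getD "") :: pvSel ans (i + 1) rest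
    else pvSel ans (i + 1) rest

def pvOk2 (p : String × String) : Bool := decide (2 ≤ pvWC p.2 ∧ pvWC p.2 ≤ 20)

theorem pvLoopA1_spec (ans : List String) : ∀ (qs : List String) (i : Nat) (tq ta : List String),
    pvLoopA1 ans i qs (tq, ta)
      = (tq ++ (pvSel ans i qs).map Prod.fst, ta ++ (pvSel ans i qs).map Prod.snd) := by
  intro qs
  induction qs with
  | nil => intro i tq ta; simp [pvLoopA1, pvSel]
  | cons q rest ih =>
    intro i tq ta
    by_cases h : 2 ≤ pvWC q ∧ pvWC q ≤ 20 <;>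
      simp [pvLoopA1, pvSel, h, ih, List.append_assoc]

theorem pvLoopA2_spec (P : List (String × String)) : ∀ (tq0 : List String) (sq sa : List String),
    pvLoopA2 (tq0 ++ P.map Prod.fst) tq0.length (P.map Prod.snd) (sq, sa)
      = (sq ++ (P.filter pvOk2).map Prod.fst, sa ++ (P.filter pvOk2).map Prod.snd) := by
  induction P with
  | nil => intro tq0 sq sa; simp [pvLoopA2]
  | cons p rest ih =>
    intro tq0 sq sa
    have hget : PySem.List.pyGet? (tq0 ++ p.1 :: rest.map Prod.fst) ((tq0.length : Nat) : Int) = some p.1 :=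
      PySem.List.pyGet?_append_length _ _ _
    have hlen : tq0.length + 1 = (tq0 ++ [p.1]).length := by simp
    by_cases h : 2 ≤ pvWC p.2 ∧ pvWC p.2 ≤ 20
    · have := ih (tq0 ++ [p.1]) (sq ++ [p.1]) (sa ++ [p.2])
      simp only [List.append_assoc, List.singleton_append] at this
      simp only [List.map_cons, pvLoopA2, h, if_true, hget, Option.getD_some, hlen, this,
        pvOk2, List.filter_cons, decide_eq_true_eq, h, List.map_cons, List.append_assoc,
        List.singleton_append]
      simp [pvOk2, h]
    · have := ih (tq0 ++ [p.1]) sq sa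
      simp only [List.append_assoc, List.singleton_append] at this
      simp only [List.map_cons, pvLoopA2, h, if_false, hlen, this]
      simp [pvOk2, h]

theorem pvLoopB_spec (ans : List String) : ∀ (qs : List String) (i : Nat) (sq sa : List String),
    pvLoopB ans i qs (sq, sa)
      = (sq ++ ((pvSel ans i qs).filter pvOk2).map Prod.fst,
         sa ++ ((pvSel ans i qs).filter pvOk2).map Prod.snd) := by
  intro qs
  induction qs with
  | nil => intro i sq sa; simp [pvLoopB, pvSel]
  | cons q rest ih =>
    intro i sq sa
    by_cases hq : 2 ≤ pvWC q ∧ pvWC q ≤ 20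
    · by_cases ha : 2 ≤ pvWC (ans[i]?.getD "") ∧ pvWC (ans[i]?.getD "") ≤ 20
      · simp [pvLoopB, pvSel, hq, ha, ih, pvOk2, List.append_assoc]
      · simp [pvLoopB, pvSel, hq, ha, ih, pvOk2]
    · simp [pvLoopB, pvSel, hq, ih]

-- ===== VERDICT (by name: the statement is the Claim_ definition above) =====
theorem filter_ques_ans_spec : Claim_equal_filter_ques_ans := by
  intro qs ans _ _
  unfold Spec_filter_ques_ans filter_ques_ans filter_ques_ans_alt
  have h1 := pvLoopA1_spec ans qs 0 [] []
  simp only [List.nil_append] at h1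
  rw [h1]
  have h2 := pvLoopA2_spec (pvSel ans 0 qs) [] [] []
  simp only [List.nil_append, List.length_nil] at h2
  rw [h2, pvLoopB_spec]
  simp
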